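-- pv_equiv track=rewrite | github.com/naruto716/coin_detection | Utils/find_region_bound.py | find_region_bounds
-- ===== SOURCE A (Python) =====
-- def find_region_bounds(image):
--     region_dict = {}
--
--     for y, row in enumerate(image):
--         for x, value in enumerate(row):
--             if value != 0:  # Ignore background
--                 if value not in region_dict:
--                     region_dict[value] = {
--                         'min_x': x, 'max_x': x,
--                         'min_y': y, 'max_y': y
--                     }
--                 else:
--                     region_dict[value]['min_x'] = min(region_dict[value]['min_x'], x)
--                     region_dict[value]['max_x'] = max(region_dict[value]['max_x'], x)
--                     region_dict[value]['min_y'] = min(region_dict[value]['min_y'], y)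
--                     region_dict[value]['max_y'] = max(region_dict[value]['max_y'], y)
--
--     return region_dict
-- ===== SOURCE B (Python) =====
-- def find_region_bounds(image):
--     # Gather pass: group non-zero pixel coordinates by label (first-appearance order).
--     groups = {}
--     for y, row in enumerate(image):
--         for x, value in enumerate(row):
--             if value != 0:  # Ignore background
--                 groups.setdefault(value, []).append((x, y))
--     # Reduce pass: one bounding box per label from its coordinate list.
--     bounds = {}
--     for value, pts in groups.items():
--         xs = [p[0] for p in pts]
--         ys = [p[1] for p in pts]
--         bounds[value] = {
--             'min_x': min(xs), 'max_x': max(xs),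
--             'min_y': min(ys), 'max_y': max(ys)
--         }
--     return bounds
-- ===== Notes on version B (the rewrite author's own statement) =====
-- stated objective: alternative
-- what changed: Replaces A's single pass with incremental per-label min/max dict updates by a group-then-reduce structure: a gathering pass collects each label's coordinate list, then a separate reduction pass computes min/max over those lists; the hot per-pixel loop does one setdefault/append instead of four dict reads and writes.
import Mathlib
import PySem

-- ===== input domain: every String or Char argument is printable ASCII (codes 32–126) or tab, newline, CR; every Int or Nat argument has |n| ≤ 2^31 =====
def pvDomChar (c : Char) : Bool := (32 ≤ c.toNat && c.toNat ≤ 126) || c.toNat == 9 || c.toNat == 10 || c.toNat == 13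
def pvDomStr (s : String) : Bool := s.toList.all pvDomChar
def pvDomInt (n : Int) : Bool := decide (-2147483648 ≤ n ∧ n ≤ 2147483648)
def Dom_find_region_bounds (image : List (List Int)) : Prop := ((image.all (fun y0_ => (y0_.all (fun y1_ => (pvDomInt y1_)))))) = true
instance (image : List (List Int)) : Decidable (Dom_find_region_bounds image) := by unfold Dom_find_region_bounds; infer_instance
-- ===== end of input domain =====

-- B replaces A's incremental per-label min/max updates by a group-then-reduce decomposition
-- (gather each label's coordinate list, then reduce each list to its bounding box); cheaper per-pixel work.

-- ===== PORT A =====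
-- region_dict[value]['min_x'] = min(region_dict[value]['min_x'], x)  etc.: the four keys are
-- always present once value is in the dict, so getD with an unreachable default is exact.
def pvUpdA (y x : Int) (inner : PySem.Dict String Int) : PySem.Dict String Int :=
  let i1 := inner.insert "min_x" (min (inner.getD "min_x" 0) x)
  let i2 := i1.insert "max_x" (max (i1.getD "max_x" 0) x)
  let i3 := i2.insert "min_y" (min (i2.getD "min_y" 0) y)
  i3.insert "max_y" (max (i3.getD "max_y" 0) y)

def pvStepA (y : Int) (d : PySem.Dict Int (PySem.Dict String Int)) (xv : Int × Int) :
    PySem.Dict Int (PySem.Dict String Int) :=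
  if xv.2 ≠ 0 then
    if d.contains xv.2 = false then
      d.insert xv.2 (PySem.Dict.ofList [("min_x", xv.1), ("max_x", xv.1), ("min_y", y), ("max_y", y)])
    else
      d.insert xv.2 (pvUpdA y xv.1 (d.getD xv.2 PySem.Dict.empty))
  else d

def find_region_bounds (image : List (List Int)) : List (Int × List (String × Int)) :=
  ((PySem.List.enumerate image 0).foldl
      (fun d yr => (PySem.List.enumerate yr.2 0).foldl (pvStepA yr.1) d)
      PySem.Dict.empty).items.map (fun p => (p.1, p.2.items))

-- ===== PORT B =====
-- groups.setdefault(value, []).append((x, y))  =  modify with default [] appending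
def pvGatherStep (y : Int) (g : PySem.Dict Int (List (Int × Int))) (xv : Int × Int) :
    PySem.Dict Int (List (Int × Int)) :=
  if xv.2 ≠ 0 then g.modify xv.2 [] (· ++ [(xv.1, y)]) else g

-- the dict literal {'min_x': min(xs), …}; every group is nonempty, so the .getD 0 default of
-- Python's min/max (which would raise only on an empty list) is unreachable
def pvBoundsB (pts : List (Int × Int)) : PySem.Dict String Int :=
  let xs := pts.map (·.1)
  let ys := pts.map (·.2)
  PySem.Dict.ofList [("min_x", (PySem.List.min? xs (fun a => a)).getD 0),
                     ("max_x", (PySem.List.max? xs (fun a => a)).getD 0),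
                     ("min_y", (PySem.List.min? ys (fun a => a)).getD 0),
                     ("max_y", (PySem.List.max? ys (fun a => a)).getD 0)]

def find_region_bounds_alt (image : List (List Int)) : List (Int × List (String × Int)) :=
  let groups := (PySem.List.enumerate image 0).foldl
      (fun g yr => (PySem.List.enumerate yr.2 0).foldl (pvGatherStep yr.1) g)
      PySem.Dict.empty
  (groups.items.foldl (fun r p => r.insert p.1 (pvBoundsB p.2)) PySem.Dict.empty).items.map
    (fun p => (p.1, p.2.items))

-- ===== PRECONDITION & SPEC =====
def Spec_find_region_bounds (image : List (List Int)) (out : List (Int × List (String × Int))) : Prop := out = find_region_bounds_alt image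
instance (image : List (List Int)) (out : List (Int × List (String × Int))) : Decidable (Spec_find_region_bounds image out) := by unfold Spec_find_region_bounds; infer_instance

-- ===== CLAIM (what is proved, stated in full; the proofs are below) =====
def Claim_equal_find_region_bounds : Prop := ∀ (image : List (List Int)), Dom_find_region_bounds image → Spec_find_region_bounds image (find_region_bounds image)

-- ===== LEMMAS AND PROOFS =====

-- "render" a grouping dict into A's dict of bounding boxes
def pvRender (g : PySem.Dict Int (List (Int × Int))) : PySem.Dict Int (PySem.Dict String Int) :=
  PySem.Dict.mk (g.items.map (fun p => (p.1, pvBoundsB p.2)))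

-- invariant on B's grouping state
def pvGood (g : PySem.Dict Int (List (Int × Int))) : Prop :=
  g.keys.Nodup ∧ ∀ pts ∈ g.values, pts ≠ []

theorem pvRender_get? (g : PySem.Dict Int (List (Int × Int))) (k : Int) :
    (pvRender g).get? k = (g.get? k).map pvBoundsB := by
  obtain ⟨l⟩ := g
  induction l with
  | nil => rfl
  | cons p rest ih =>
    obtain ⟨a, pts⟩ := p
    simp only [pvRender, List.map_cons, PySem.Dict.get?_mk_cons] at *
    split_ifs <;> simp_all

theorem pvRender_contains (g : PySem.Dict Int (List (Int × Int))) (k : Int) :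
    (pvRender g).contains k = g.contains k := by
  rw [PySem.Dict.contains_eq_isSome_get?, PySem.Dict.contains_eq_isSome_get?, pvRender_get?]
  cases g.get? k <;> rfl

theorem pvRender_insert (g : PySem.Dict Int (List (Int × Int))) (k : Int) (pts : List (Int × Int)) :
    pvRender (g.insert k pts) = (pvRender g).insert k (pvBoundsB pts) := by
  apply PySem.Dict.ext
  show (g.insert k pts).items.map _ = _
  rw [PySem.Dict.items_insert, PySem.Dict.items_insert, pvRender_contains]
  by_cases h : g.contains k = true
  · simp only [h, if_true]
    show _ = (pvRender g).items.map _
    simp only [pvRender, List.map_map]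
    apply List.map_congr_left
    intro p _
    by_cases hp : p.1 = k <;> simp [hp]
  · simp only [h]
    simp [pvRender]

theorem pvMin?_append (xs : List Int) (a : Int) (h : xs ≠ []) :
    (PySem.List.min? (xs ++ [a]) (fun b => b)).getD 0
      = min ((PySem.List.min? xs (fun b => b)).getD 0) a := by
  have hm : ∃ m, PySem.List.min? xs (fun b => b) = some m := by
    cases hx : PySem.List.min? xs (fun b => b) with
    | none => exact absurd ((PySem.List.min?_eq_none_iff xs (fun b => b)).mp hx) h
    | some m => exact ⟨m, rfl⟩
  obtain ⟨m, hm⟩ := hm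
  simp only [PySem.List.min?] at hm ⊢
  rw [List.foldl_append, hm]
  simp only [List.foldl_cons, List.foldl_nil]
  split_ifs with hlt <;> simp <;> omega

theorem pvMax?_append (xs : List Int) (a : Int) (h : xs ≠ []) :
    (PySem.List.max? (xs ++ [a]) (fun b => b)).getD 0
      = max ((PySem.List.max? xs (fun b => b)).getD 0) a := by
  have hm : ∃ m, PySem.List.max? xs (fun b => b) = some m := by
    cases hx : PySem.List.max? xs (fun b => b) with
    | none => exact absurd ((PySem.List.max?_eq_none_iff xs (fun b => b)).mp hx) h
    | some m => exact ⟨m, rfl⟩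
  obtain ⟨m, hm⟩ := hm
  simp only [PySem.List.max?] at hm ⊢
  rw [List.foldl_append, hm]
  simp only [List.foldl_cons, List.foldl_nil]
  split_ifs with hlt <;> simp <;> omega

theorem pvBoundsB_append (pts : List (Int × Int)) (x y : Int) (h : pts ≠ []) :
    pvUpdA y x (pvBoundsB pts) = pvBoundsB (pts ++ [(x, y)]) := by
  have hx : pts.map (·.1) ≠ [] := by simpa using h
  have hy : pts.map (·.2) ≠ [] := by simpa using h
  simp only [pvBoundsB, pvUpdA, List.map_append, List.map_cons, List.map_nil,
    pvMin?_append _ _ hx, pvMax?_append _ _ hx, pvMin?_append _ _ hy, pvMax?_append _ _ hy]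
  simp [PySem.Dict.ofList, PySem.Dict.update, PySem.Dict.insert, PySem.Dict.contains,
    PySem.Dict.getD, PySem.Dict.get?, PySem.Dict.empty, min_comm, max_comm]

theorem pvBoundsB_single (x y : Int) :
    pvBoundsB [(x, y)] = PySem.Dict.ofList [("min_x", x), ("max_x", x), ("min_y", y), ("max_y", y)] := by
  rfl

theorem pvStep_render (y : Int) (xv : Int × Int) (g : PySem.Dict Int (List (Int × Int)))
    (hg : pvGood g) :
    pvStepA y (pvRender g) xv = pvRender (pvGatherStep y g xv) ∧ pvGood (pvGatherStep y g xv) := by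
  obtain ⟨hnd, hne⟩ := hg
  by_cases h0 : xv.2 = 0
  · have hid : pvGatherStep y g xv = g := by simp [pvGatherStep, h0]
    rw [hid]
    exact ⟨by simp [pvStepA, h0], hnd, hne⟩
  · have hmod : pvGatherStep y g xv = g.insert xv.2 (g.getD xv.2 [] ++ [(xv.1, y)]) := by
      simp [pvGatherStep, h0, PySem.Dict.modify]
    constructor
    · rw [hmod]
      by_cases hc : g.contains xv.2 = true
      · have hsome : ∃ pts, g.get? xv.2 = some pts := by
          cases hq : g.get? xv.2 with
          | none => rw [PySem.Dict.contains_eq_isSome_get?, hq] at hc; simp at hc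
          | some pts => exact ⟨pts, rfl⟩
        obtain ⟨pts, hpts⟩ := hsome
        have hptsne : pts ≠ [] := by
          have hmem : (xv.2, pts) ∈ g.items := PySem.Dict.mem_items_of_get?_eq_some g hpts
          exact hne pts (by simpa [PySem.Dict.values] using List.mem_map_of_mem (f := fun p => p.2) hmem)
        have hgetD : g.getD xv.2 [] = pts := PySem.Dict.getD_of_get?_eq_some g [] hpts
        have hrgetD : (pvRender g).getD xv.2 PySem.Dict.empty = pvBoundsB pts := by
          rw [PySem.Dict.getD_eq_get?_getD, pvRender_get?, hpts]; rfl
        rw [pvRender_insert]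
        simp [pvStepA, h0, pvRender_contains, hc, hrgetD, hgetD, pvBoundsB_append pts xv.1 y hptsne]
      · have hc' : g.contains xv.2 = false := by simpa using hc
        have hgetD : g.getD xv.2 [] = [] := PySem.Dict.getD_of_not_contains g [] hc'
        rw [pvRender_insert]
        simp [pvStepA, h0, pvRender_contains, hc', hgetD, pvBoundsB_single]
    · rw [hmod]
      constructor
      · exact PySem.Dict.nodup_keys_insert _ _ _ hnd
      · intro pts hmem
        rcases PySem.Dict.mem_values_insert _ _ _ _ hmem with h | h
        · subst h; simp
        · exact hne pts h

theorem pvRow_render (y : Int) (l : List (Int × Int)) (g : PySem.Dict Int (List (Int × Int)))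
    (hg : pvGood g) :
    l.foldl (pvStepA y) (pvRender g) = pvRender (l.foldl (pvGatherStep y) g) ∧
      pvGood (l.foldl (pvGatherStep y) g) := by
  induction l generalizing g with
  | nil => exact ⟨rfl, hg⟩
  | cons xv rest ih =>
    obtain ⟨h1, h2⟩ := pvStep_render y xv g hg
    simpa [List.foldl_cons, h1] using ih (pvGatherStep y g xv) h2

theorem pvRows_render (rows : List (Int × List Int)) (g : PySem.Dict Int (List (Int × Int)))
    (hg : pvGood g) :
    rows.foldl (fun d yr => (PySem.List.enumerate yr.2 0).foldl (pvStepA yr.1) d) (pvRender g)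
      = pvRender (rows.foldl (fun d yr => (PySem.List.enumerate yr.2 0).foldl (pvGatherStep yr.1) d) g) ∧
      pvGood (rows.foldl (fun d yr => (PySem.List.enumerate yr.2 0).foldl (pvGatherStep yr.1) d) g) := by
  induction rows generalizing g with
  | nil => exact ⟨rfl, hg⟩
  | cons yr rest ih =>
    obtain ⟨h1, h2⟩ := pvRow_render yr.1 (PySem.List.enumerate yr.2 0) g hg
    simpa [List.foldl_cons, h1] using ih _ h2

theorem pvGood_empty : pvGood (PySem.Dict.empty : PySem.Dict Int (List (Int × Int))) := by
  constructor
  · simp [PySem.Dict.keys, PySem.Dict.empty]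
  · intro pts h; simp [PySem.Dict.values, PySem.Dict.empty] at h

-- ===== VERDICT (by name: the statement is the Claim_ definition above) =====
theorem find_region_bounds_spec : Claim_equal_find_region_bounds := by
  intro image _
  show find_region_bounds image = find_region_bounds_alt image
  obtain ⟨h1, h2⟩ := pvRows_render (PySem.List.enumerate image 0) PySem.Dict.empty pvGood_empty
  rw [show pvRender PySem.Dict.empty = PySem.Dict.empty from rfl] at h1
  have hfresh := PySem.Dict.items_foldl_insert_fresh
      ((List.foldl (fun d (yr : Int × List Int) => (PySem.List.enumerate yr.2 0).foldl (pvGatherStep yr.1) d)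
          PySem.Dict.empty (PySem.List.enumerate image 0)).items)
      (fun p => p.1) (fun p => pvBoundsB p.2)
      (PySem.Dict.empty : PySem.Dict Int (PySem.Dict String Int))
      (fun a _ => PySem.Dict.contains_empty _) (by simpa [PySem.Dict.keys] using h2.1)
  simp only [find_region_bounds, find_region_bounds_alt, h1]
  congr 1
  rw [hfresh]
  simp [pvRender, PySem.Dict.empty]
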